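-- pv_equiv track=rewrite | github.com/brave/brave-core | tools/generate_policy_constants_java.py | generate_java_content
-- ===== SOURCE A (Python) =====
-- def generate_java_constant_name(policy_name):
--     """Convert policy name to Java constant name.
--
--     Handles acronyms properly:
--     - 'BraveWebDiscoveryEnabled' -> 'BRAVE_WEB_DISCOVERY_ENABLED'
--     - 'BraveP3AEnabled' -> 'BRAVE_P3A_ENABLED'
--     - 'BraveAIChatEnabled' -> 'BRAVE_AI_CHAT_ENABLED'
--     - 'BraveVPNDisabled' -> 'BRAVE_VPN_DISABLED'
--     """
--     result = []
--     i = 0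
--     while i < len(policy_name):
--         char = policy_name[i]
--
--         if char.isupper():
--             # Check if this starts an acronym (consecutive uppercase letters
--             # possibly followed by a digit)
--             acronym_end = i + 1
--             while acronym_end < len(policy_name):
--                 next_char = policy_name[acronym_end]
--                 if next_char.isupper():
--                     acronym_end += 1
--                 elif next_char.isdigit():
--                     # Include digits in acronyms (like P3A)
--                     acronym_end += 1
--                 else:
--                     break
--
--             acronym_len = acronym_end - i
--
--             if acronym_len > 1:
--                 # We have an acronym
--                 # Check if the last uppercase letter starts the next word
--                 if (acronym_end < len(policy_name)
--                         and policy_name[acronym_end - 1].isupper()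
--                         and policy_name[acronym_end].islower()):
--                     # The last uppercase is part of next word (e.g., "AIChat")
--                     acronym_end -= 1
--                     acronym_len -= 1
--
--                 if result:
--                     result.append('_')
--                 result.append(policy_name[i:acronym_end].upper())
--                 i = acronym_end
--             else:
--                 # Single uppercase letter - start of a new word
--                 if result:
--                     result.append('_')
--                 result.append(char.upper())
--                 i += 1
--         else:
--             result.append(char.upper())
--             i += 1
--
--     return ''.join(result)
--
-- def generate_java_content(policy_names):
--     """Generate Java file content with policy constants."""
--     java_content = (
--         """/* Copyright (c) 2025 The Brave Authors. All rights reserved.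
--  * This Source Code Form is subject to the terms of the Mozilla Public
--  * License, v. 2.0. If a copy of the MPL was not distributed with this file,
--  * You can obtain one at https://mozilla.org/MPL/2.0/. */
--
-- package org.chromium.chrome.browser.policy;
--
-- /**
--  * Policy key constants for Brave policies.
--  *
--  * <p>This file is auto-generated from policy YAML definitions.
--  * Do not edit manually.
--  */
-- public final class BravePolicyConstants {
--     private BravePolicyConstants() {
--         // Prevent instantiation
--     }
--
-- """)
--
--     # Generate constants for each policy
--     for policy_name in sorted(policy_names):
--         constant_name = generate_java_constant_name(policy_name)
--         java_content += (f'    public static final String {constant_name} = '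
--                          f'"{policy_name}";\n')
--
--     java_content += "}\n"
--     return java_content
-- ===== SOURCE B (Python) =====
-- _HEADER = """/* Copyright (c) 2025 The Brave Authors. All rights reserved.
--  * This Source Code Form is subject to the terms of the Mozilla Public
--  * License, v. 2.0. If a copy of the MPL was not distributed with this file,
--  * You can obtain one at https://mozilla.org/MPL/2.0/. */
--
-- package org.chromium.chrome.browser.policy;
--
-- /**
--  * Policy key constants for Brave policies.
--  *
--  * <p>This file is auto-generated from policy YAML definitions.
--  * Do not edit manually.
--  */
-- public final class BravePolicyConstants {
--     private BravePolicyConstants() {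
--         // Prevent instantiation
--     }
--
-- """
--
--
-- def _is_word_start(name, i):
--     """A new word starts at position i (so '_' goes before it when i > 0)."""
--     if not name[i].isupper():
--         return False
--     if i == 0:
--         return True
--     # The contiguous [A-Z0-9] run immediately before position i.
--     run = []
--     for c in reversed(name[:i]):
--         if c.isupper() or c.isdigit():
--             run.append(c)
--         else:
--             break
--     if not any(c.isupper() for c in run):
--         # Not inside an acronym: this uppercase begins a new word.
--         return True
--     # Inside an acronym: it begins a word only when peeled off before a
--     # lowercase letter (the "AIChat" -> AI_CHAT rule).
--     return i + 1 < len(name) and name[i + 1].islower()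
--
--
-- def generate_java_constant_name(policy_name):
--     return ''.join(
--         ('_' if i > 0 and _is_word_start(policy_name, i) else '') + c.upper()
--         for i, c in enumerate(policy_name))
--
--
-- def generate_java_content(policy_names):
--     return _HEADER + ''.join(
--         f'    public static final String {generate_java_constant_name(n)} = '
--         f'"{n}";\n' for n in sorted(policy_names)) + "}\n"
-- ===== Notes on version B (the rewrite author's own statement) =====
-- stated objective: alternative
-- what changed: generate_java_constant_name's forward index-walking acronym state machine (with lookahead scan and end peel-back) is replaced by a stateless per-character word-start classification using a backward scan of the preceding [A-Z0-9] run, and the file body is built by join-over-a-comprehension instead of repeated string concatenation in a loop.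
import Mathlib
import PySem

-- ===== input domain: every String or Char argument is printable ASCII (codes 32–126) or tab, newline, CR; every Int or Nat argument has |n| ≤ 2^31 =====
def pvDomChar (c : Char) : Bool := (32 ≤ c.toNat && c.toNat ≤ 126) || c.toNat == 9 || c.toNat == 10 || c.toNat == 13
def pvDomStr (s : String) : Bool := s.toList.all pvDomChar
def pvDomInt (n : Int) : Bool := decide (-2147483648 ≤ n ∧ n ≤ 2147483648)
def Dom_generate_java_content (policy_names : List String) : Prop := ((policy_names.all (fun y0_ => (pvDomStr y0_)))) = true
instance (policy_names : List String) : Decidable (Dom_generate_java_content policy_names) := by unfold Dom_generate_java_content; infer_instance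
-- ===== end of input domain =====

-- B replaces A's index-walking acronym state machine by a per-character word-start
-- classification (backward run scan) and assembles the file by join-over-map instead of a
-- fold of appends; objective: alternative (same cost, different algorithm).

-- shared primitive: the character class A's inner scan walks over ([A-Z0-9])
def pvRunChar (c : Char) : Bool := PySem.Chars.isupper c || PySem.Chars.isdigit c

-- the Java file header (verbatim string constant from the Python source, shared)
def pvHeader : String := "/* Copyright (c) 2025 The Brave Authors. All rights reserved.\n * This Source Code Form is subject to the terms of the Mozilla Public\n * License, v. 2.0. If a copy of the MPL was not distributed with this file,\n * You can obtain one at https://mozilla.org/MPL/2.0/. */\n\npackage org.chromium.chrome.browser.policy;\n\n/**\n * Policy key constants for Brave policies.\n *\n * <p>This file is auto-generated from policy YAML definitions.\n * Do not edit manually.\n */\npublic final class BravePolicyConstants {\n    private BravePolicyConstants() {\n        // Prevent instantiation\n    }\n\n"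

-- ===== PORT A =====

-- A's inner while loop: advance acronym_end while the char is uppercase or a digit
def aRunScan (s : List Char) (j : Nat) : Nat :=
  if h : j < s.length then
    if pvRunChar (s.getD j ' ') then aRunScan s (j + 1) else j
  else j
termination_by s.length - j
decreasing_by omega

-- A's peel-back of the acronym end ("the last uppercase is part of the next word")
def aPeel (s : List Char) (i : Nat) : Nat :=
  if decide (aRunScan s (i + 1) < s.length)
      && PySem.Chars.isupper (s.getD (aRunScan s (i + 1) - 1) ' ')
      && PySem.Chars.islower (s.getD (aRunScan s (i + 1)) ' ') then
    aRunScan s (i + 1) - 1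
  else aRunScan s (i + 1)

lemma aPeel_gt (s : List Char) (i : Nat) (h : 1 < aRunScan s (i + 1) - i) : i < aPeel s i := by
  unfold aPeel; split <;> omega

-- A's main while loop (result is the accumulated list of characters; '_' appended iff nonempty)
def aConstLoop (s : List Char) (i : Nat) (result : List Char) : List Char :=
  if h : i < s.length then
    if PySem.Chars.isupper (s.getD i ' ') then
      if hr : 1 < aRunScan s (i + 1) - i then
        aConstLoop s (aPeel s i)
          (result ++ (if result = [] then [] else ['_'])
            ++ PySem.Chars.upper (PySem.List.slice s (some (i : Int)) (some (aPeel s i : Int))))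
      else
        aConstLoop s (i + 1)
          (result ++ (if result = [] then [] else ['_']) ++ [PySem.Chars.upperChar (s.getD i ' ')])
    else
      aConstLoop s (i + 1) (result ++ [PySem.Chars.upperChar (s.getD i ' ')])
  else result
termination_by s.length - i
decreasing_by
  · have := aPeel_gt s i hr; omega
  · omega
  · omega

def aConstName (p : String) : String := String.ofList (aConstLoop p.toList 0 [])

def generate_java_content (policy_names : List String) : String :=
  ((PySem.List.sorted policy_names (fun x => x) false).foldl
    (fun acc n => acc ++ ("    public static final String " ++ aConstName n ++ " = \"" ++ n ++ "\";\n"))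
    pvHeader) ++ "}\n"

-- ===== PORT B =====

-- does a new word start at position i? (then '_' goes before it when i > 0)
def bIsWordStart (s : List Char) (i : Nat) : Bool :=
  if i < s.length then
    if !(PySem.Chars.isupper (s.getD i ' ')) then false
    else if i == 0 then true
    else
      -- the contiguous [A-Z0-9] run immediately before position i (loop-with-break)
      if !(((s.take i).reverse.takeWhile pvRunChar).any PySem.Chars.isupper) then true
      else decide (i + 1 < s.length) && PySem.Chars.islower (s.getD (i + 1) ' ')
  else false

def bConstName (p : String) : String :=
  String.ofList ((PySem.List.enumerate p.toList 0).flatMap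
    (fun ic => (if decide (0 < ic.1) && bIsWordStart p.toList ic.1.toNat then ['_'] else [])
      ++ [PySem.Chars.upperChar ic.2]))

def generate_java_content_alt (policy_names : List String) : String :=
  pvHeader
    ++ String.join ((PySem.List.sorted policy_names (fun x => x) false).map
        (fun n => "    public static final String " ++ bConstName n ++ " = \"" ++ n ++ "\";\n"))
    ++ "}\n"

-- ===== PRECONDITION & SPEC =====
def Spec_generate_java_content (policy_names : List String) (out : String) : Prop := out = generate_java_content_alt policy_names
instance (policy_names : List String) (out : String) : Decidable (Spec_generate_java_content policy_names out) := by unfold Spec_generate_java_content; infer_instance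

-- ===== CLAIM (what is proved, stated in full; the proofs are below) =====
def Claim_equal_generate_java_content : Prop := ∀ (policy_names : List String), Dom_generate_java_content policy_names → Spec_generate_java_content policy_names (generate_java_content policy_names)

-- ===== LEMMAS AND PROOFS =====

-- character-class facts
lemma run_not_lower {c : Char} (h : pvRunChar c = true) : PySem.Chars.islower c = false := by
  simp [pvRunChar, PySem.Chars.isupper, PySem.Chars.isdigit, PySem.Chars.islower,
    Char.le_def, UInt32.le_iff_toNat_le] at *
  omega

lemma upper_run {c : Char} (h : PySem.Chars.isupper c = true) : pvRunChar c = true := by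
  simp [pvRunChar, h]

-- aRunScan facts
lemma aRunScan_ge (s : List Char) (j : Nat) : j ≤ aRunScan s j := by
  induction j using aRunScan.induct (s := s) with
  | case1 j h hc ih => rw [aRunScan, dif_pos h, if_pos hc]; omega
  | case2 j h hc => rw [aRunScan, dif_pos h, if_neg hc]
  | case3 j h => rw [aRunScan, dif_neg h]

lemma aRunScan_le_length (s : List Char) (j : Nat) (h : j ≤ s.length) : aRunScan s j ≤ s.length := by
  induction j using aRunScan.induct (s := s) with
  | case1 j h1 hc ih => rw [aRunScan, dif_pos h1, if_pos hc]; exact ih (by omega)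
  | case2 j h1 hc => rw [aRunScan, dif_pos h1, if_neg hc]; omega
  | case3 j h1 => rw [aRunScan, dif_neg h1]; exact h

lemma aRunScan_mem (s : List Char) (j : Nat) : ∀ k, j ≤ k → k < aRunScan s j → pvRunChar (s.getD k ' ') = true := by
  induction j using aRunScan.induct (s := s) with
  | case1 j h1 hc ih =>
    intro k hjk hk
    rw [aRunScan, dif_pos h1, if_pos hc] at hk
    rcases Nat.eq_or_lt_of_le hjk with rfl | hlt
    · exact hc
    · exact ih k hlt hk
  | case2 j h1 hc =>
    intro k hjk hk
    rw [aRunScan, dif_pos h1, if_neg hc] at hk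
    omega
  | case3 j h1 =>
    intro k hjk hk
    rw [aRunScan, dif_neg h1] at hk
    omega

lemma aRunScan_stop (s : List Char) (j : Nat) (h : aRunScan s j < s.length) : pvRunChar (s.getD (aRunScan s j) ' ') = false := by
  induction j using aRunScan.induct (s := s) with
  | case1 j h1 hc ih => rw [aRunScan, dif_pos h1, if_pos hc] at h ⊢; exact ih h
  | case2 j h1 hc => rw [aRunScan, dif_pos h1, if_neg hc] at h ⊢; simpa using hc
  | case3 j h1 => rw [aRunScan, dif_neg h1] at h; omega

-- the backward run that bIsWordStart inspects
def backRun (s : List Char) (i : Nat) : List Char := (s.take i).reverse.takeWhile pvRunChar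

lemma backRun_zero (s : List Char) : backRun s 0 = [] := by simp [backRun]

lemma backRun_succ (s : List Char) (i : Nat) (h : i < s.length) :
    backRun s (i + 1) = if pvRunChar (s.getD i ' ') then s.getD i ' ' :: backRun s i else [] := by
  unfold backRun
  rw [List.take_add_one, List.getElem?_eq_getElem h, List.getD_eq_getElem _ _ h]
  simp only [Option.toList_some, List.reverse_append, List.reverse_cons, List.reverse_nil,
    List.nil_append, List.cons_append, List.takeWhile_cons]

-- the loop invariant: when the A-loop stands at position i and s[i] is in [A-Z0-9],
-- either no uppercase sits in the backward run (so an uppercase here starts a word)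
-- or i was peeled off an acronym (uppercase here, lowercase next)
def pvInv (s : List Char) (i : Nat) : Prop :=
  i < s.length → pvRunChar (s.getD i ' ') = true →
    ((backRun s i).any PySem.Chars.isupper = false ∨
     (PySem.Chars.isupper (s.getD i ' ') = true ∧ i + 1 < s.length ∧ PySem.Chars.islower (s.getD (i + 1) ' ') = true))

lemma bIsWordStart_true (s : List Char) (i : Nat) (h : i < s.length) (hInv : pvInv s i)
    (hu : PySem.Chars.isupper (s.getD i ' ') = true) : bIsWordStart s i = true := by
  unfold bIsWordStart
  rw [if_pos h]
  rcases hInv h (upper_run hu) with hany | ⟨-, h2, hl⟩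
  · have h1 : ((s.take i).reverse.takeWhile pvRunChar).any PySem.Chars.isupper = false := hany
    simp only [List.getD_eq_getElem?_getD] at hu h1 ⊢
    simp [hu, h1]
  · have hd : decide (i + 1 < s.length) = true := by simp [h2]
    simp only [List.getD_eq_getElem?_getD] at hu hl ⊢
    simp [hu, hd, hl]

-- s[i] uppercase and [i, m) all run chars put an uppercase into m's backward run
lemma backRun_any (s : List Char) (i : Nat) (hu : PySem.Chars.isupper (s.getD i ' ') = true) :
    ∀ m, i < m → m ≤ s.length →
    (∀ t, i ≤ t → t < m → pvRunChar (s.getD t ' ') = true) →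
    (backRun s m).any PySem.Chars.isupper = true := by
  intro m
  induction m with
  | zero => omega
  | succ m ih =>
    intro him hmlen hall
    rw [backRun_succ s m (by omega), if_pos (hall m (by omega) (by omega))]
    rcases Nat.eq_or_lt_of_le (Nat.succ_le_of_lt him) with hm | hm
    · have : i = m := by omega
      subst this
      have hu' : PySem.Chars.isupper (s[i]?.getD ' ') = true := by
        simpa [List.getD_eq_getElem?_getD] using hu
      simp [hu']
    · simp [ih (by omega) (by omega) (fun t ht1 ht2 => hall t ht1 (by omega))]

-- B's rendering of the suffix of positions ≥ i
def bFrom (s : List Char) (i : Nat) : List Char :=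
  if i < s.length then
    (if decide (0 < i) && bIsWordStart s i then ['_'] else [])
      ++ (PySem.Chars.upperChar (s.getD i ' ') :: bFrom s (i + 1))
  else []
termination_by s.length - i
decreasing_by omega

lemma enum_flatMap (s : List Char) : ∀ (n i : Nat), s.length - i ≤ n →
    (PySem.List.enumerate (s.drop i) (i : Int)).flatMap
      (fun ic => (if decide (0 < ic.1) && bIsWordStart s ic.1.toNat then ['_'] else [])
        ++ [PySem.Chars.upperChar ic.2]) = bFrom s i := by
  intro n
  induction n with
  | zero =>
    intro i hi
    have hge : s.length ≤ i := by omega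
    rw [List.drop_eq_nil_of_le hge, bFrom, if_neg (by omega)]
    simp [PySem.List.enumerate]
  | succ n ih =>
    intro i hi
    by_cases hlt : i < s.length
    · rw [List.drop_eq_getElem_cons hlt, PySem.List.enumerate_cons, List.flatMap_cons,
        bFrom, if_pos hlt]
      have h1 : ((i : Int) + 1) = ((i + 1 : Nat) : Int) := by push_cast; ring
      have h2 : ((i : Int)).toNat = i := Int.toNat_natCast i
      have h3 : decide (0 < (i : Int)) = decide (0 < i) := by simp
      rw [h1, ih (i + 1) (by omega)]
      simp [h2, List.getElem?_eq_getElem hlt]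
    · rw [List.drop_eq_nil_of_le (by omega), bFrom, if_neg hlt]
      simp [PySem.List.enumerate]

lemma bConst_eq_bFrom (p : String) : bConstName p = String.ofList (bFrom p.toList 0) := by
  unfold bConstName
  have h := enum_flatMap p.toList p.toList.length 0 (by omega)
  simp only [List.drop_zero, Nat.cast_zero] at h
  rw [h]

lemma bFrom_pos (s : List Char) (i : Nat) (h : i < s.length) :
    bFrom s i = (if decide (0 < i) && bIsWordStart s i then ['_'] else [])
      ++ (PySem.Chars.upperChar (s.getD i ' ') :: bFrom s (i + 1)) := by
  conv_lhs => rw [bFrom]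
  rw [if_pos h]

-- rendering a separator-free segment [k, e)
lemma bFrom_seg (s : List Char) (e : Nat) (he : e ≤ s.length) :
    ∀ k, k ≤ e → (∀ m, k ≤ m → m < e → bIsWordStart s m = false) →
    bFrom s k = ((s.drop k).take (e - k)).map PySem.Chars.upperChar ++ bFrom s e := by
  intro k
  induction hk : e - k generalizing k with
  | zero =>
    intro _ _
    have : e = k := by omega
    subst this
    simp
  | succ n ih =>
    intro hke hsep
    have hklt : k < e := by omega
    have hklen : k < s.length := by omega
    rw [bFrom, if_pos hklen, hsep k (le_refl k) hklt]
    rw [List.drop_eq_getElem_cons hklen, List.take_succ_cons, List.map_cons]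
    rw [ih (k + 1) (by omega) (by omega) (fun m hm1 hm2 => hsep m (by omega) hm2)]
    simp [List.getElem?_eq_getElem hklen]

-- the main correspondence: from any loop position satisfying the invariant,
-- A's loop appends exactly B's rendering of the remaining positions
lemma aLoop_eq_bFrom (s : List Char) : ∀ (n i : Nat) (result : List Char),
    s.length - i ≤ n → pvInv s i → (result = [] ↔ i = 0) →
    aConstLoop s i result = result ++ bFrom s i := by
  intro n
  induction n with
  | zero =>
    intro i result hfuel hInv hres
    rw [aConstLoop, dif_neg (by omega), bFrom, if_neg (by omega)]
    simp
  | succ n ih =>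
    intro i result hfuel hInv hres
    by_cases hlt : i < s.length
    case neg =>
      rw [aConstLoop, dif_neg hlt, bFrom, if_neg hlt]
      simp
    case pos =>
    by_cases hu : PySem.Chars.isupper (s.getD i ' ') = true
    case neg =>
      -- A's else branch: non-uppercase, appended with no separator
      rw [aConstLoop, dif_pos hlt, if_neg hu]
      have hws : bIsWordStart s i = false := by
        have hu' : PySem.Chars.isupper (s[i]?.getD ' ') = false := by
          have h0 : PySem.Chars.isupper (s.getD i ' ') = false := by simpa using hu
          simpa [List.getD_eq_getElem?_getD] using h0
        unfold bIsWordStart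
        rw [if_pos hlt]
        simp [hu']
      have hInv' : pvInv s (i + 1) := by
        intro h1 h2
        rw [backRun_succ s i hlt]
        by_cases hrc : pvRunChar (s.getD i ' ') = true
        · rw [if_pos hrc]
          left
          rcases hInv hlt hrc with hany | ⟨hupp, _, _⟩
          · have hu' : PySem.Chars.isupper (s.getD i ' ') = false := by
              simpa using hu
            simp only [List.any_cons, hany, hu', Bool.or_false]
          · exact absurd hupp hu
        · rw [if_neg hrc]
          left
          rfl
      rw [ih (i + 1) _ (by omega) hInv' (by simp)]
      rw [bFrom_pos s i hlt, hws]
      simp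
    case pos =>
      have hws : bIsWordStart s i = true := bIsWordStart_true s i hlt hInv hu
      have hge : i + 1 ≤ aRunScan s (i + 1) := aRunScan_ge s (i + 1)
      have hlen : aRunScan s (i + 1) ≤ s.length := aRunScan_le_length s (i + 1) (by omega)
      by_cases hr : 1 < aRunScan s (i + 1) - i
      case neg =>
        -- single uppercase letter: a one-letter word
        have hr1 : aRunScan s (i + 1) = i + 1 := by omega
        rw [aConstLoop, dif_pos hlt, if_pos hu, dif_neg hr]
        have hInv' : pvInv s (i + 1) := by
          intro h1 h2
          rw [← hr1] at h1 h2
          rw [aRunScan_stop s (i + 1) h1] at h2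
          exact absurd h2 (by simp)
        rw [ih (i + 1) _ (by omega) hInv' (by simp)]
        rw [bFrom_pos s i hlt, hws]
        by_cases hi0 : i = 0
        · have : result = [] := hres.2 hi0
          subst this
          simp [hi0]
        · have hne : ¬ (result = []) := fun hh => hi0 (hres.1 hh)
          have hd0 : decide (0 < i) = true := by simp; omega
          simp [hne, hd0]
      case pos =>
        -- an acronym: A consumes [i, aPeel s i) at once
        rw [aConstLoop, dif_pos hlt, if_pos hu, dif_pos hr]
        have hr2cases : (aPeel s i = aRunScan s (i + 1) - 1 ∧ aRunScan s (i + 1) < s.length ∧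
              PySem.Chars.isupper (s.getD (aRunScan s (i + 1) - 1) ' ') = true ∧
              PySem.Chars.islower (s.getD (aRunScan s (i + 1)) ' ') = true)
            ∨ (aPeel s i = aRunScan s (i + 1) ∧ (aRunScan s (i + 1) < s.length →
                PySem.Chars.isupper (s.getD (aRunScan s (i + 1) - 1) ' ') = false ∨
                PySem.Chars.islower (s.getD (aRunScan s (i + 1)) ' ') = false)) := by
          unfold aPeel
          rcases hc : (decide (aRunScan s (i + 1) < s.length)
              && PySem.Chars.isupper (s.getD (aRunScan s (i + 1) - 1) ' ')
              && PySem.Chars.islower (s.getD (aRunScan s (i + 1)) ' ')) with _ | _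
          · right
            rw [if_neg (by simp)]
            refine ⟨rfl, fun hrl => ?_⟩
            simp only [Bool.and_eq_false_iff, decide_eq_false_iff_not] at hc
            rcases hc with (hc | hc) | hc
            · omega
            · left; simpa using hc
            · right; simpa using hc
          · left
            rw [if_pos rfl]
            simp only [Bool.and_eq_true, decide_eq_true_eq] at hc
            exact ⟨rfl, hc.1.1, hc.1.2, hc.2⟩
        have hgt : i < aPeel s i := aPeel_gt s i hr
        have hler : aPeel s i ≤ aRunScan s (i + 1) := by
          rcases hr2cases with ⟨hpe, _, _, _⟩ | ⟨hpe, _⟩ <;> omega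
        have hlelen : aPeel s i ≤ s.length := by omega
        have hrun_mid : ∀ m, i + 1 ≤ m → m < aRunScan s (i + 1) →
            pvRunChar (s.getD m ' ') = true := fun m h1 h2 => aRunScan_mem s (i + 1) m h1 h2
        -- no word starts strictly inside the consumed segment
        have hsep : ∀ m, i + 1 ≤ m → m < aPeel s i → bIsWordStart s m = false := by
          intro m hm1 hm2
          have hmlen : m < s.length := by omega
          have hrcm : pvRunChar (s.getD m ' ') = true := hrun_mid m hm1 (by omega)
          unfold bIsWordStart
          rw [if_pos hmlen]
          by_cases hum : PySem.Chars.isupper (s.getD m ' ') = true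
          case neg =>
            have hum' : PySem.Chars.isupper (s[m]?.getD ' ') = false := by
              have : PySem.Chars.isupper (s.getD m ' ') = false := by simpa using hum
              simpa [List.getD_eq_getElem?_getD] using this
            simp [hum']
          case pos =>
            have hany : (backRun s m).any PySem.Chars.isupper = true := by
              refine backRun_any s i hu m (by omega) (by omega) (fun t ht1 ht2 => ?_)
              rcases Nat.eq_or_lt_of_le ht1 with rfl | htgt
              · exact upper_run hu
              · exact hrun_mid t (by omega) (by omega)
            have hlow : (decide (m + 1 < s.length)
                && PySem.Chars.islower (s.getD (m + 1) ' ')) = false := by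
              by_cases hm3 : m + 1 < aPeel s i
              · have h5 := run_not_lower (hrun_mid (m + 1) (by omega) (by omega))
                have h5' : PySem.Chars.islower (s[m + 1]?.getD ' ') = false := by
                  simpa [List.getD_eq_getElem?_getD] using h5
                simp [h5']
              · have hmeq : m + 1 = aPeel s i := by omega
                rcases hr2cases with ⟨hpe, hrlen, hup1, hlo1⟩ | ⟨hpe, hrest⟩
                · have hin : m + 1 < aRunScan s (i + 1) := by omega
                  have h5 := run_not_lower (hrun_mid (m + 1) (by omega) hin)
                  have h5' : PySem.Chars.islower (s[m + 1]?.getD ' ') = false := by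
                    simpa [List.getD_eq_getElem?_getD] using h5
                  simp [h5']
                · by_cases hrl : aRunScan s (i + 1) < s.length
                  · rcases hrest hrl with hup | hlo
                    · have hmm : m = aRunScan s (i + 1) - 1 := by omega
                      rw [← hmm] at hup
                      rw [hup] at hum
                      exact absurd hum (by simp)
                    · have hmm : m + 1 = aRunScan s (i + 1) := by omega
                      rw [← hmm] at hlo
                      have hlo' : PySem.Chars.islower (s[m + 1]?.getD ' ') = false := by
                        simpa [List.getD_eq_getElem?_getD] using hlo
                      simp [hlo']
                  · have : ¬ (m + 1 < s.length) := by omega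
                    simp [this]
            have hum' : PySem.Chars.isupper (s[m]?.getD ' ') = true := by
              simpa [List.getD_eq_getElem?_getD] using hum
            have hany' : ((s.take m).reverse.takeWhile pvRunChar).any PySem.Chars.isupper = true := hany
            have hm0 : ¬ (m = 0) := by omega
            simp only [hum', Bool.not_true, Bool.false_eq_true, if_false, hany',
              beq_iff_eq, hm0, List.getD_eq_getElem?_getD] at hlow ⊢
            simp [hlow]
        -- the invariant holds again at the next loop position
        have hInv' : pvInv s (aPeel s i) := by
          intro h1 h2
          rcases hr2cases with ⟨hpe, hrlen, hup1, hlo1⟩ | ⟨hpe, hrest⟩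
          · right
            rw [hpe]
            have heq : aRunScan s (i + 1) - 1 + 1 = aRunScan s (i + 1) := by omega
            rw [heq]
            exact ⟨hup1, by omega, hlo1⟩
          · rw [hpe] at h1 h2
            rw [aRunScan_stop s (i + 1) h1] at h2
            exact absurd h2 (by simp)
        -- the slice A uppercases, as a map over drop/take
        have hslice : PySem.Chars.upper (PySem.List.slice s (some (i : Int)) (some (aPeel s i : Int)))
            = ((s.drop i).take (aPeel s i - i)).map PySem.Chars.upperChar := by
          rw [PySem.List.slice_toNat s (a := ((i : Nat) : Int)) (b := ((aPeel s i : Nat) : Int))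
            (Int.natCast_nonneg _) (Int.natCast_nonneg _)]
          simp [PySem.Chars.upper]
        have hdrop : (s.drop i).take (aPeel s i - i)
            = s[i] :: ((s.drop (i + 1)).take (aPeel s i - (i + 1))) := by
          rw [List.drop_eq_getElem_cons hlt]
          have : aPeel s i - i = (aPeel s i - (i + 1)) + 1 := by omega
          rw [this, List.take_succ_cons]
        have hbseg : bFrom s (i + 1)
            = ((s.drop (i + 1)).take (aPeel s i - (i + 1))).map PySem.Chars.upperChar
              ++ bFrom s (aPeel s i) :=
          bFrom_seg s (aPeel s i) hlelen (i + 1) (by omega) hsep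
        have hresiff : (result ++ (if result = [] then [] else ['_'])
              ++ PySem.Chars.upper (PySem.List.slice s (some (i : Int)) (some (aPeel s i : Int))) = [])
            ↔ (aPeel s i = 0) := by
          apply iff_of_false
          · rw [hslice, hdrop]
            simp
          · omega
        rw [ih (aPeel s i) _ (by omega) hInv' hresiff]
        rw [bFrom_pos s i hlt, hws, hbseg, hslice, hdrop]
        have hgetd : s.getD i ' ' = s[i] := List.getD_eq_getElem _ _ hlt
        have h8 : s[i]?.getD ' ' = s[i] := by rw [List.getElem?_eq_getElem hlt]; rfl
        by_cases hi0 : i = 0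
        · have h9 : result = [] := hres.2 hi0
          subst h9
          subst hi0
          simp
          exact congrArg _ h8.symm
        · have hne : ¬ (result = []) := fun hh => hi0 (hres.1 hh)
          have hd0 : decide (0 < i) = true := by simp; omega
          simp [hne, hd0]
          exact congrArg _ h8.symm

lemma constName_eq (p : String) : aConstName p = bConstName p := by
  unfold aConstName
  rw [aLoop_eq_bFrom p.toList p.toList.length 0 [] (by omega)
    (fun h hr => Or.inl (by rw [backRun_zero]; rfl)) (by simp)]
  rw [bConst_eq_bFrom]
  simp

lemma foldl_append_join_aux : ∀ (l : List String) (acc : String),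
    l.foldl (fun r s => r ++ s) acc = acc ++ l.foldl (fun r s => r ++ s) "" := by
  intro l
  induction l with
  | nil => intro acc; simp
  | cons x xs ih =>
    intro acc
    simp only [List.foldl_cons]
    rw [ih, ih ("" ++ x)]
    simp [String.append_assoc]

lemma foldl_append_join (g : String → String) : ∀ (l : List String) (acc : String),
    l.foldl (fun acc n => acc ++ g n) acc = acc ++ String.join (l.map g) := by
  intro l
  induction l with
  | nil => intro acc; simp [String.join]
  | cons x xs ih =>
    intro acc
    simp only [List.foldl_cons, List.map_cons]
    rw [ih]
    show _ = acc ++ ((g x :: List.map g xs).foldl (fun r s => r ++ s) "")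
    rw [List.foldl_cons, foldl_append_join_aux (List.map g xs) ("" ++ g x)]
    show _ = _
    simp [String.join, String.append_assoc]

-- ===== VERDICT (by name: the statement is the Claim_ definition above) =====
theorem generate_java_content_spec : Claim_equal_generate_java_content := by
  intro l _
  unfold Spec_generate_java_content generate_java_content generate_java_content_alt
  rw [foldl_append_join]
  simp only [constName_eq]
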